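-- pv_equiv track=rewrite | github.com/lukamarcic/Uvp-Enigma | model.py | preveri_rotor
-- ===== SOURCE A (Python) =====
-- def preveri_rotor(per):
--     for i in range(len(per)):
--         if per.count(i) != 1:
--             return False
--
--     for i in per:
--         if per.index(i) == i:
--             return False
--
--     return True
-- ===== SOURCE B (Python) =====
-- def preveri_rotor(per):
--     if sorted(per) != list(range(len(per))):
--         return False
--     for i, v in enumerate(per):
--         if v == i:
--             return False
--     return True
-- ===== Notes on version B (the rewrite author's own statement) =====
-- stated objective: alternative
-- what changed: Replaces A's two quadratic scans (per.count(i) for every i in range(n), then per.index(i) for every element) by a sort-and-compare permutation check plus one linear enumerate pass for fixed points.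
import Mathlib
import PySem

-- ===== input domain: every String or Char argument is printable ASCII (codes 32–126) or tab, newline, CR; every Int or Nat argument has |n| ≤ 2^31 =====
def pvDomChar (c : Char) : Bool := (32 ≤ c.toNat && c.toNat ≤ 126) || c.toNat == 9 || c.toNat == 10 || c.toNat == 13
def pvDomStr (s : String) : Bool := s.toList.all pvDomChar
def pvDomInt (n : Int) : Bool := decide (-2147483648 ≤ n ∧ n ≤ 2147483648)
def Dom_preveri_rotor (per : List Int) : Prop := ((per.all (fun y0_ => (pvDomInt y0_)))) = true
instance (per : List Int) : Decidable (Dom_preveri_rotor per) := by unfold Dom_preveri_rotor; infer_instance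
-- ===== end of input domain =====

-- B replaces A's count/index scans by a sort-and-compare permutation check plus one linear fixed-point pass (alternative algorithm).

-- ===== PORT A =====
-- first loop: for i in range(len(per)): if per.count(i) != 1: return False
def pvAFirst (per : List Int) : List Int → Option Bool
  | [] => none
  | i :: rest => if PySem.List.count per i ≠ 1 then some false else pvAFirst per rest

-- second loop: for i in per: if per.index(i) == i: return False
-- (per.index(i) cannot raise here: i is drawn from per; the none branch is unreachable)
def pvASecond (per : List Int) : List Int → Option Bool
  | [] => none
  | i :: rest =>
      match PySem.List.index? per i with
      | some k => if (k : Int) = i then some false else pvASecond per rest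
      | none => pvASecond per rest

def preveri_rotor (per : List Int) : Bool :=
  match pvAFirst per (PySem.List.pyRange 0 per.length 1) with
  | some b => b
  | none =>
      match pvASecond per per with
      | some b => b
      | none => true

-- ===== PORT B =====
-- for i, v in enumerate(per): if v == i: return False
def pvBScan : List Int → Int → Bool
  | [], _ => true
  | v :: rest, i => if v = i then false else pvBScan rest (i + 1)

def preveri_rotor_alt (per : List Int) : Bool :=
  if PySem.List.sorted per (fun x => x) false ≠ PySem.List.pyRange 0 per.length 1 then false
  else pvBScan per 0

-- ===== PRECONDITION & SPEC =====
def Spec_preveri_rotor (per : List Int) (out : Bool) : Prop := out = preveri_rotor_alt per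
instance (per : List Int) (out : Bool) : Decidable (Spec_preveri_rotor per out) := by unfold Spec_preveri_rotor; infer_instance

-- ===== CLAIM (what is proved, stated in full; the proofs are below) =====
def Claim_equal_preveri_rotor : Prop := ∀ (per : List Int), Dom_preveri_rotor per → Spec_preveri_rotor per (preveri_rotor per)

-- ===== LEMMAS AND PROOFS =====

theorem pvAFirst_eq (per : List Int) (l : List Int) :
    pvAFirst per l = if l.all (fun i => PySem.List.count per i == 1) then none else some false := by
  induction l with
  | nil => simp [pvAFirst]
  | cons i rest ih =>
      by_cases h : List.count i per = 1 <;>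
        simp [pvAFirst, PySem.List.count_eq, h, ih, List.all_cons]

-- does per.index(i) == i fire for this element?
def pvFix (per : List Int) (i : Int) : Bool :=
  match PySem.List.index? per i with
  | some k => (k : Int) == i
  | none => false

theorem pvASecond_eq (per : List Int) (l : List Int) :
    pvASecond per l = if l.all (fun i => ! pvFix per i) then none else some false := by
  induction l with
  | nil => simp [pvASecond]
  | cons i rest ih =>
      cases h : PySem.List.index? per i with
      | none =>
          simp only [PySem.List.index?_eq_idxOf?] at h
          simp [pvASecond, pvFix, h, ih, List.all_cons]
      | some k =>
          simp only [PySem.List.index?_eq_idxOf?] at h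
          by_cases hk : (k : Int) = i <;>
            simp [pvASecond, pvFix, h, hk, ih, List.all_cons]

theorem pvBScan_eq_true_iff (l : List Int) (s : Int) :
    pvBScan l s = true ↔ ∀ (k : ℕ) (hk : k < l.length), l[k] ≠ s + (k : Int) := by
  induction l generalizing s with
  | nil => simp [pvBScan]
  | cons v rest ih =>
      simp only [pvBScan]
      by_cases hv : v = s
      · simp only [hv, reduceIte]
        constructor
        · intro h; exact absurd h (by simp)
        · intro h
          have := h 0 (by simp)
          simp at this
      · rw [if_neg hv, ih]
        constructor
        · intro h k hk
          cases k with
          | zero => simpa using hv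
          | succ m =>
              have := h m (by simpa using Nat.lt_of_succ_lt_succ hk)
              simpa [add_assoc, add_comm, add_left_comm] using this
        · intro h m hm
          have := h (m + 1) (by simpa using Nat.succ_lt_succ hm)
          simpa [add_assoc, add_comm, add_left_comm] using this

theorem pvPerm_iff (per : List Int) :
    ((PySem.List.pyRange 0 per.length 1).all (fun i => PySem.List.count per i == 1)) = true ↔
      per.Perm (PySem.List.pyRange 0 per.length 1) := by
  constructor
  · intro h
    have hsub : List.Subperm (PySem.List.pyRange 0 per.length 1) per := by
      rw [List.subperm_ext_iff]
      intro a ha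
      have h1 : PySem.List.count per a = 1 := by
        have := List.all_eq_true.mp h a ha
        simpa [PySem.List.count_eq] using this
      have hcr : (PySem.List.pyRange 0 per.length 1).count a = 1 :=
        List.count_eq_one_of_mem (PySem.List.nodup_pyRange_one 0 per.length) ha
      rw [hcr, ← PySem.List.count_eq, h1]
    have hlen : per.length ≤ (PySem.List.pyRange 0 per.length 1).length := by
      rw [PySem.List.length_pyRange_one]
      simp
    exact (hsub.perm_of_length_le hlen).symm
  · intro hp
    rw [List.all_eq_true]
    intro a ha
    have hc : per.count a = (PySem.List.pyRange 0 per.length 1).count a := hp.count_eq a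
    rw [List.count_eq_one_of_mem (PySem.List.nodup_pyRange_one 0 per.length) ha] at hc
    simp [PySem.List.count_eq, hc]

theorem pvFix_all_iff (per : List Int) (hnd : per.Nodup) :
    (per.all (fun i => ! pvFix per i)) = true ↔
      ∀ (k : ℕ) (hk : k < per.length), per[k] ≠ (0 : Int) + (k : Int) := by
  rw [List.all_eq_true]
  constructor
  · intro h k hk hval
    have hmem : ((k : Int)) ∈ per := by
      have hm : per[k] ∈ per := List.getElem_mem hk
      rwa [hval, zero_add] at hm
    have hni := h _ hmem
    obtain ⟨j, hj⟩ := Option.isSome_iff_exists.mp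
      ((PySem.List.index?_isSome_iff per ((k : Int))).mpr hmem)
    obtain ⟨hjlt, hjval, _⟩ := PySem.List.getElem_of_index?_eq_some hj
    have hkj : j = k := by
      have heq : per[j] = per[k] := by rw [hjval, hval, zero_add]
      exact hnd.getElem_inj_iff.mp heq
    simp only [pvFix, hj, hkj] at hni
    simp at hni
  · intro h i hi
    simp only [pvFix]
    cases hidx : PySem.List.index? per i with
    | none => simp
    | some k =>
        obtain ⟨hklt, hkval, _⟩ := PySem.List.getElem_of_index?_eq_some hidx
        simp only [Bool.not_eq_eq_eq_not, Bool.not_true, beq_eq_false_iff_ne, ne_eq]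
        intro hk
        exact h k hklt (by rw [hkval, ← hk, zero_add])

-- ===== VERDICT (by name: the statement is the Claim_ definition above) =====
theorem preveri_rotor_spec : Claim_equal_preveri_rotor := by
  intro per _
  unfold Spec_preveri_rotor
  by_cases hp : per.Perm (PySem.List.pyRange 0 per.length 1)
  · have hsorted : PySem.List.sorted per (fun x => x) false = PySem.List.pyRange 0 per.length 1 :=
      PySem.List.sorted_eq_of_perm_of_pairwise_lt per _ (fun x => x) hp.symm
        (PySem.List.pairwise_lt_pyRange_one 0 per.length)
    have h1 := (pvPerm_iff per).mpr hp
    have hnd : per.Nodup := hp.nodup_iff.mpr (PySem.List.nodup_pyRange_one 0 per.length)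
    have hB : preveri_rotor_alt per = pvBScan per 0 := by
      unfold preveri_rotor_alt
      rw [if_neg (by simp [hsorted] : ¬ PySem.List.sorted per (fun x => x) false ≠ PySem.List.pyRange 0 per.length 1)]
    have hA : preveri_rotor per = per.all (fun i => ! pvFix per i) := by
      unfold preveri_rotor
      rw [pvAFirst_eq, if_pos h1, pvASecond_eq]
      by_cases hall : (per.all (fun i => ! pvFix per i)) = true <;> simp [hall]
    rw [hA, hB]
    cases hall : per.all (fun i => ! pvFix per i) with
    | true =>
        exact ((pvBScan_eq_true_iff per 0).mpr ((pvFix_all_iff per hnd).mp hall)).symm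
    | false =>
        cases hb : pvBScan per 0 with
        | false => rfl
        | true =>
            have := (pvFix_all_iff per hnd).mpr ((pvBScan_eq_true_iff per 0).mp hb)
            rw [hall] at this
            exact absurd this (by simp)
  · have hsorted : PySem.List.sorted per (fun x => x) false ≠ PySem.List.pyRange 0 per.length 1 := by
      intro h
      have hperm := PySem.List.sorted_perm per (fun x => x) false
      rw [h] at hperm
      exact hp hperm.symm
    have hB : preveri_rotor_alt per = false := by
      unfold preveri_rotor_alt
      rw [if_pos hsorted]
    have hA : preveri_rotor per = false := by
      unfold preveri_rotor
      rw [pvAFirst_eq, if_neg (fun h => hp ((pvPerm_iff per).mp h))]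
    rw [hA, hB]
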